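-- pv_equiv track=rewrite | github.com/thisismeamir/WelcherArtikelBot | src/core/Modules/database.py | ValuesNumber
-- ===== SOURCE A (Python) =====
-- def ValuesNumber(repeate):
--     i =  1
--     Values = ""
--     while i < repeate:
--         Values = Values + "?,"
--         i += 1
--     Values = Values + "?"
--     return Values
-- ===== SOURCE B (Python) =====
-- def ValuesNumber(repeate):
--     return "?" + ",?" * (repeate - 1)
-- ===== Notes on version B (the rewrite author's own statement) =====
-- stated objective: idiomatic
-- what changed: Replaces the while-loop that accumulates '?,' pieces with the closed-form string multiplication '?' + ',?'*(repeate-1), which yields the same value for every integer count including non-positive ones.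
import Mathlib
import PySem

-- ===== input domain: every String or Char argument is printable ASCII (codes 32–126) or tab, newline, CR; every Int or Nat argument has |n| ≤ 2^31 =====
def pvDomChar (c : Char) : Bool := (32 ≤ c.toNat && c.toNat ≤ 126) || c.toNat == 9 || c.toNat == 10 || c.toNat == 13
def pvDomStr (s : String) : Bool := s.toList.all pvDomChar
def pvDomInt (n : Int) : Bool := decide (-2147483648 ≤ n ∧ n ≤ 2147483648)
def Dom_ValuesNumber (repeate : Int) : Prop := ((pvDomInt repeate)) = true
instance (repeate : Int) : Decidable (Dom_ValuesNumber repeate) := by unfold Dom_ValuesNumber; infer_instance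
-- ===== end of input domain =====

-- B replaces A's while-loop accumulation with the closed form "?" + ",?"*(repeate-1) (idiomatic; same value for all ints).

-- ===== PORT A =====
-- A's while loop, transliterated on the character-list side (Values = ""; while i < repeate: Values += "?,"; Values += "?").
def ValuesNumberLoop (repeate : Int) (i : Int) (values : List Char) : List Char :=
  if i < repeate then ValuesNumberLoop repeate (i + 1) (values ++ ['?', ','])
  else values ++ ['?']
termination_by (repeate - i).toNat
decreasing_by omega

def ValuesNumber (repeate : Int) : String :=
  String.mk (ValuesNumberLoop repeate 1 [])

-- ===== PORT B =====
-- "?" + ",?" * (repeate - 1); Python string multiplication by n ≤ 0 yields "" (PySem.List.pyRepeat).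
def ValuesNumber_alt (repeate : Int) : String :=
  String.mk ('?' :: PySem.List.pyRepeat [',', '?'] (repeate - 1))

-- ===== PRECONDITION & SPEC =====
def Spec_ValuesNumber (repeate : Int) (out : String) : Prop := out = ValuesNumber_alt repeate
instance (repeate : Int) (out : String) : Decidable (Spec_ValuesNumber repeate out) := by unfold Spec_ValuesNumber; infer_instance

-- ===== CLAIM (what is proved, stated in full; the proofs are below) =====
def Claim_equal_ValuesNumber : Prop := ∀ (repeate : Int), Dom_ValuesNumber repeate → Spec_ValuesNumber repeate (ValuesNumber repeate)

-- ===== LEMMAS AND PROOFS =====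

-- A's loop appends "?," exactly (repeate - i).toNat times, then "?".
theorem valuesNumberLoop_eq (k : Nat) : ∀ (repeate i : Int) (v : List Char),
    (repeate - i).toNat = k →
    ValuesNumberLoop repeate i v = v ++ (List.replicate k ['?', ',']).flatten ++ ['?'] := by
  induction k with
  | zero =>
    intro r i v hk
    rw [ValuesNumberLoop]
    have : ¬ i < r := by omega
    simp [this]
  | succ n ih =>
    intro r i v hk
    rw [ValuesNumberLoop]
    have hlt : i < r := by omega
    have h2 : (r - (i + 1)).toNat = n := by omega
    rw [if_pos hlt, ih r (i + 1) (v ++ ['?', ',']) h2]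
    simp [List.replicate_succ]

-- "?,"*n + "?" equals "?" + ",?"*n.
theorem shuffle (n : Nat) :
    (List.replicate n ['?', ',']).flatten ++ ['?'] = '?' :: (List.replicate n [',', '?']).flatten := by
  induction n with
  | zero => simp
  | succ m ih => simp [List.replicate_succ, ih]

-- ===== VERDICT (by name: the statement is the Claim_ definition above) =====
theorem ValuesNumber_spec : Claim_equal_ValuesNumber := by
  intro r _
  show ValuesNumber r = ValuesNumber_alt r
  unfold ValuesNumber ValuesNumber_alt PySem.List.pyRepeat
  rw [valuesNumberLoop_eq ((r - 1).toNat) r 1 [] rfl]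
  simp [shuffle]
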